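-- pv_equiv track=rewrite | github.com/jsolvason/tfsites-paper-2025 | tfsites_2025_07_30.py | iupac_to_regex_pattern
-- ===== SOURCE A (Python) =====
-- iupac2allnt= {
--         'A':['A'],
--         'C':['C'],
--         'G':['G'],
--         'T':['T'],
--         'R':['A','G'],
--         'Y':['C','T'],
--         'S':['G','C'],
--         'W':['A','T'],
--         'K':['G','T'],
--         'M':['A','C'],
--         'B':['C','G','T'],
--         'D':['A','G','T'],
--         'H':['A','C','T'],
--         'V':['A','C','G'],
--         'N':['A','C','G','T'],
-- }
--
-- def iupac_to_regex_pattern(seq):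
--     p=''
--     for iupac in seq:
--         if iupac in ['A','T','G','C']:
--             p+=iupac
--         else:
--             p+='('
--             for nt in iupac2allnt[iupac]:
--                 p+=nt
--                 p+='|'
--             p=p[:-1]
--             p+=')'
--     return p
-- ===== SOURCE B (Python) =====
-- iupac2allnt= {
--         'A':['A'],
--         'C':['C'],
--         'G':['G'],
--         'T':['T'],
--         'R':['A','G'],
--         'Y':['C','T'],
--         'S':['G','C'],
--         'W':['A','T'],
--         'K':['G','T'],
--         'M':['A','C'],
--         'B':['C','G','T'],
--         'D':['A','G','T'],
--         'H':['A','C','T'],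
--         'V':['A','C','G'],
--         'N':['A','C','G','T'],
-- }
--
-- # Staged rewriting: one whole-string replace pass per ambiguity code.
-- # Inserted fragments only contain A,C,G,T,(,|,) which are never patterns,
-- # and no pattern occurs in any fragment, so the passes are independent.
-- _REPLACEMENTS = [
--     ('R', '(A|G)'),
--     ('Y', '(C|T)'),
--     ('S', '(G|C)'),
--     ('W', '(A|T)'),
--     ('K', '(G|T)'),
--     ('M', '(A|C)'),
--     ('B', '(C|G|T)'),
--     ('D', '(A|G|T)'),
--     ('H', '(A|C|T)'),
--     ('V', '(A|C|G)'),
--     ('N', '(A|C|G|T)'),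
-- ]
--
-- def iupac_to_regex_pattern(seq):
--     # a rewriting pass would silently let a non-IUPAC letter through, so reject it up front
--     bad = set(seq).difference(iupac2allnt)
--     if bad:
--         raise KeyError(bad.pop())
--     for code, frag in _REPLACEMENTS:
--         seq = seq.replace(code, frag)
--     return seq
-- ===== Notes on version B (the rewrite author's own statement) =====
-- stated objective: alternative
-- what changed: Replaces the per-character branch-and-inner-alternation loop (with its p[:-1] trim and per-char dict lookup) by an up-front alphabet check followed by eleven staged whole-string replace passes, one per ambiguity code.
import Mathlib
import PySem

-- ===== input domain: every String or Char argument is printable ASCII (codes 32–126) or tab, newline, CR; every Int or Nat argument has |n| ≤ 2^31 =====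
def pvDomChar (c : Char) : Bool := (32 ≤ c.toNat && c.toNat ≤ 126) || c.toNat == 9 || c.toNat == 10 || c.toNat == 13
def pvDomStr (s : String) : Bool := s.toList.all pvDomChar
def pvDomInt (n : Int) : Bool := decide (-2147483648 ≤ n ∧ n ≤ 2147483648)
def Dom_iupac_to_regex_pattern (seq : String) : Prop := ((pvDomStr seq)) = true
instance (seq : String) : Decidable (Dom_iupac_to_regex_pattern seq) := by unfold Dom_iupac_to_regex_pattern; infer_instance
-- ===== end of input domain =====

-- B rejects non-IUPAC characters up front (KeyError, outside Pre_) and then builds the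
-- pattern by eleven staged whole-string replace passes, one per ambiguity code, instead of
-- A's per-character branch + inner alternation loop (objective: alternative).


-- ===== PORT A =====
def iupac2allnt : PySem.Dict Char (List Char) := PySem.Dict.ofList
  [('A', ['A']), ('C', ['C']), ('G', ['G']), ('T', ['T']),
   ('R', ['A','G']), ('Y', ['C','T']), ('S', ['G','C']), ('W', ['A','T']),
   ('K', ['G','T']), ('M', ['A','C']), ('B', ['C','G','T']), ('D', ['A','G','T']),
   ('H', ['A','C','T']), ('V', ['A','C','G']), ('N', ['A','C','G','T'])]

-- body of A's outer loop (p is the accumulated string as chars); the dict lookup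
-- uses getD with default [] — Pre_ guarantees the key is present (else Python's KeyError)
def iupacStep (p : List Char) (iupac : Char) : List Char :=
  if iupac ∈ ['A','T','G','C'] then p ++ [iupac]
  else
    let p := p ++ ['(']
    let p := (PySem.Dict.getD iupac2allnt iupac []).foldl (fun q nt => q ++ [nt] ++ ['|']) p
    let p := PySem.List.slice p none (some (-1))   -- p[:-1]
    p ++ [')']

def iupac_to_regex_pattern (seq : String) : String :=
  String.ofList (seq.toList.foldl iupacStep [])

-- ===== PORT B =====
-- Source B's _REPLACEMENTS table: one (single-char pattern, fragment) pair per ambiguity code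
def pvReplacements : List (List Char × List Char) :=
  [(['R'], "(A|G)".toList), (['Y'], "(C|T)".toList), (['S'], "(G|C)".toList),
   (['W'], "(A|T)".toList), (['K'], "(G|T)".toList), (['M'], "(A|C)".toList),
   (['B'], "(C|G|T)".toList), (['D'], "(A|G|T)".toList), (['H'], "(A|C|T)".toList),
   (['V'], "(A|C|G)".toList), (['N'], "(A|C|G|T)".toList)]

-- Source B: reject any character that is not an iupac2allnt key (Python raises KeyError
-- there — outside Pre_, the port returns "" on that branch), then one replace pass per pair
def iupac_to_regex_pattern_alt (seq : String) : String :=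
  if seq.toList.any (fun c => !(iupac2allnt.contains c)) then ""
  else String.ofList (pvReplacements.foldl (fun s p => PySem.Chars.replace s p.1 p.2) seq.toList)

-- ===== PRECONDITION & SPEC =====
-- Pre_ excludes strings with a character that is not an IUPAC code: there A raises KeyError.
def Pre_iupac_to_regex_pattern (seq : String) : Prop :=
  (seq.toList.all (fun c => c ∈ ['A','C','G','T','R','Y','S','W','K','M','B','D','H','V','N'])) = true
instance (seq : String) : Decidable (Pre_iupac_to_regex_pattern seq) := by
  unfold Pre_iupac_to_regex_pattern; infer_instance
def pvWitness_iupac_to_regex_pattern : String := "ANRT"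

def Spec_iupac_to_regex_pattern (seq : String) (out : String) : Prop := out = iupac_to_regex_pattern_alt seq
instance (seq : String) (out : String) : Decidable (Spec_iupac_to_regex_pattern seq out) := by unfold Spec_iupac_to_regex_pattern; infer_instance

-- ===== CLAIM (what is proved, stated in full; the proofs are below) =====
def Claim_equal_iupac_to_regex_pattern : Prop := ∀ (seq : String), Dom_iupac_to_regex_pattern seq → Pre_iupac_to_regex_pattern seq → Spec_iupac_to_regex_pattern seq (iupac_to_regex_pattern seq)

-- ===== LEMMAS AND PROOFS =====

-- B's whole chain of replace passes, as a function on char lists (proof-side helper)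
def pvChain (l : List Char) : List Char :=
  pvReplacements.foldl (fun s p => PySem.Chars.replace s p.1 p.2) l

-- replace with a SINGLE-CHAR pattern is a per-character substitution (flatMap)
theorem replace_go_single (c : Char) (r : List Char) :
    ∀ (l : List Char) (fuel : Nat) (acc : List Char), l.length ≤ fuel →
    PySem.Chars.replace.go [c] r fuel l acc =
      acc.reverse ++ l.flatMap (fun d => if d = c then r else [d]) := by
  intro l
  induction l with
  | nil =>
    intro fuel acc _
    cases fuel <;> simp [PySem.Chars.replace.go]
  | cons d t ih =>
    intro fuel acc hfuel
    cases fuel with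
    | zero => simp at hfuel
    | succ f =>
      simp only [PySem.Chars.replace.go]
      by_cases hdc : d = c
      · subst hdc
        have : List.isPrefixOf [d] (d :: t) = true := by simp [List.isPrefixOf]
        rw [if_pos this]
        simp only [List.length_cons, List.length_nil, Nat.zero_add, List.drop_succ_cons, List.drop_zero]
        rw [ih f (r.reverse ++ acc) (by simpa using Nat.le_of_succ_le_succ hfuel)]
        simp
      · have : List.isPrefixOf [c] (d :: t) = false := by
          simp [List.isPrefixOf]; exact fun h => (hdc h.symm).elim
        rw [if_neg (by simp [this])]
        rw [ih f (d :: acc) (by simpa using Nat.le_of_succ_le_succ hfuel)]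
        simp [hdc]

theorem replace_single (c : Char) (r l : List Char) :
    PySem.Chars.replace l [c] r = l.flatMap (fun d => if d = c then r else [d]) := by
  simp only [PySem.Chars.replace, List.isEmpty]
  rw [replace_go_single c r l l.length [] le_rfl]
  simp

-- each replace pass, hence the whole chain, is a homomorphism for ++
theorem chain_append (x y : List Char) : pvChain (x ++ y) = pvChain x ++ pvChain y := by
  show List.foldl _ _ _ = _
  have : ∀ (ps : List (List Char × List Char)),
      (∀ p ∈ ps, ∃ c, p.1 = [c]) →
      ∀ (x y : List Char),
      ps.foldl (fun s p => PySem.Chars.replace s p.1 p.2) (x ++ y) =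
        ps.foldl (fun s p => PySem.Chars.replace s p.1 p.2) x ++
        ps.foldl (fun s p => PySem.Chars.replace s p.1 p.2) y := by
    intro ps
    induction ps with
    | nil => intro _ x y; simp
    | cons p ps ih =>
      intro h x y
      simp only [List.foldl_cons]
      obtain ⟨c, hc⟩ := h p (by simp)
      rw [hc, replace_single, replace_single, replace_single, List.flatMap_append]
      exact ih (fun q hq => h q (by simp [hq])) _ _
  exact this pvReplacements (by intro p hp; fin_cases hp <;> exact ⟨_, rfl⟩) x y

theorem chain_flatten (cs : List Char) :
    pvChain cs = (cs.map (fun c => pvChain [c])).flatten := by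
  induction cs with
  | nil => decide
  | cons c t ih =>
    have : (c :: t) = [c] ++ t := rfl
    rw [this, chain_append, ih]; simp

-- on an IUPAC code, A's loop body appends exactly what B's chain makes of that code
theorem iupacStep_eq (p : List Char) (c : Char)
    (h : c ∈ ['A','C','G','T','R','Y','S','W','K','M','B','D','H','V','N']) :
    iupacStep p c = p ++ pvChain [c] := by
  fin_cases h <;> simp [iupacStep, PySem.List.slice_to_neg_one] <;> decide

theorem foldl_iupacStep (cs : List Char) (p : List Char)
    (h : ∀ c ∈ cs, c ∈ ['A','C','G','T','R','Y','S','W','K','M','B','D','H','V','N']) :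
    cs.foldl iupacStep p = p ++ (cs.map (fun c => pvChain [c])).flatten := by
  induction cs generalizing p with
  | nil => simp
  | cons c cs ih =>
    simp only [List.foldl_cons, List.map_cons, List.flatten_cons]
    rw [iupacStep_eq p c (h c (by simp)), ih _ (fun x hx => h x (by simp [hx]))]
    simp

-- ===== VERDICT (by name: the statement is the Claim_ definition above) =====
theorem iupac_to_regex_pattern_spec : Claim_equal_iupac_to_regex_pattern := by
  intro seq _ hpre
  unfold Spec_iupac_to_regex_pattern iupac_to_regex_pattern iupac_to_regex_pattern_alt
  rw [if_neg (by
    simp only [List.any_eq_true, not_exists, not_and, Bool.not_eq_true', Bool.not_eq_false]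
    intro c hc
    have h := of_decide_eq_true (List.all_eq_true.mp hpre c hc)
    fin_cases h <;> decide)]
  rw [foldl_iupacStep _ _ (fun c hc => of_decide_eq_true (List.all_eq_true.mp hpre c hc))]
  rw [show (pvReplacements.foldl (fun s p => PySem.Chars.replace s p.1 p.2) seq.toList) = pvChain seq.toList from rfl]
  rw [chain_flatten]
  simp
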